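-- pv_equiv track=rewrite | github.com/Solpo/advent_of_code_2022 | 17/toka_toka.py | siisti
-- ===== SOURCE A (Python) =====
-- def siisti(torni: list) -> list:
--     tyhja_rivi = [" " for _ in range(7)]
--     for _ in range(len(torni)):
--         if torni[-1] == tyhja_rivi:
--             torni.pop(-1)
--         else:
--             break
--     return torni
-- ===== SOURCE B (Python) =====
-- def siisti(torni: list) -> list:
--     tyhja_rivi = [" "] * 7
--     cut = len(torni)
--     while cut > 0 and torni[cut - 1] == tyhja_rivi:
--         cut -= 1
--     del torni[cut:]
--     return torni
-- ===== Notes on version B (the rewrite author's own statement) =====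
-- stated objective: alternative
-- what changed: B scans from the end to find the boundary index of the last non-empty row and deletes the whole tail in one bulk `del torni[cut:]`, instead of A's pop-one-row-at-a-time loop over range(len(torni)).
import Mathlib
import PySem

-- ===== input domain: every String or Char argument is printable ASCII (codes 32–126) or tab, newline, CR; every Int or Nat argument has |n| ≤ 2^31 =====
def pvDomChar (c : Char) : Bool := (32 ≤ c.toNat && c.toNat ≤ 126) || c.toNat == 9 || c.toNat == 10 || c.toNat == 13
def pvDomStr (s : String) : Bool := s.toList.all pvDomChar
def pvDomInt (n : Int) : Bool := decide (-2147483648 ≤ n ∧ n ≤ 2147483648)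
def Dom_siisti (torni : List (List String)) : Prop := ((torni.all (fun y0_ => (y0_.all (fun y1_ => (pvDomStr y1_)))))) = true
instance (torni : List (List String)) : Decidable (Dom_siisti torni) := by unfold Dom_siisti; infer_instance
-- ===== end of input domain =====

-- B finds the boundary of the trailing empty rows from the end and removes the tail in one
-- bulk delete, instead of A's pop-one-at-a-time loop; same in-place mutation of the argument,
-- equivalence proved about the return value. Objective: alternative decomposition.

-- ===== PORT A =====
-- tyhja_rivi = [" " for _ in range(7)]
def pvEmptyRow : List String := List.replicate 7 " "

-- for _ in range(len(torni)): if torni[-1] == tyhja_rivi: torni.pop(-1) else: break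
def siistiLoop : Nat → List (List String) → List (List String)
  | 0, t => t
  | n + 1, t =>
    if t.getLast? = some pvEmptyRow then siistiLoop n t.dropLast else t

def siisti (torni : List (List String)) : List (List String) :=
  siistiLoop torni.length torni

-- ===== PORT B =====
-- cut = len(torni); while cut > 0 and torni[cut-1] == tyhja_rivi: cut -= 1
def pvFindCut (t : List (List String)) : Nat → Nat
  | 0 => 0
  | n + 1 => if t[n]? = some pvEmptyRow then pvFindCut t n else n + 1

-- del torni[cut:]; return torni
def siisti_alt (torni : List (List String)) : List (List String) :=
  torni.take (pvFindCut torni torni.length)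

-- ===== PRECONDITION & SPEC =====
def Spec_siisti (torni : List (List String)) (out : List (List String)) : Prop := out = siisti_alt torni
instance (torni : List (List String)) (out : List (List String)) : Decidable (Spec_siisti torni out) := by unfold Spec_siisti; infer_instance

-- ===== CLAIM (what is proved, stated in full; the proofs are below) =====
def Claim_equal_siisti : Prop := ∀ (torni : List (List String)), Dom_siisti torni → Spec_siisti torni (siisti torni)

-- ===== LEMMAS AND PROOFS =====

theorem pvFindCut_le (t : List (List String)) : ∀ n, pvFindCut t n ≤ n := by
  intro n
  induction n with
  | zero => simp [pvFindCut]
  | succ k ih => simp only [pvFindCut]; split <;> omega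

theorem pvFindCut_append (s : List (List String)) (a : List String) :
    ∀ k, k ≤ s.length → pvFindCut (s ++ [a]) k = pvFindCut s k := by
  intro k
  induction k with
  | zero => intro _; rfl
  | succ k ih =>
    intro hk
    have hlt : k < s.length := by omega
    simp only [pvFindCut, List.getElem?_append_left hlt]
    split
    · exact ih (by omega)
    · rfl

theorem siistiLoop_reverse (s : List (List String)) :
    siistiLoop s.reverse.length s.reverse =
      (s.dropWhile (fun r => r == pvEmptyRow)).reverse := by
  induction s with
  | nil => simp [siistiLoop]
  | cons a s ih =>
    simp only [List.reverse_cons, List.length_append, List.length_reverse,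
      List.length_cons, List.length_nil]
    show siistiLoop (s.length + 1) (s.reverse ++ [a]) = _
    simp only [siistiLoop, List.getLast?_concat, List.dropLast_concat, Option.some.injEq,
      List.dropWhile_cons]
    by_cases h : a = pvEmptyRow
    · subst h
      simp only [beq_self_eq_true, if_pos trivial]
      simpa using ih
    · simp [h]

theorem siisti_alt_reverse (s : List (List String)) :
    (s.reverse).take (pvFindCut s.reverse s.reverse.length) =
      (s.dropWhile (fun r => r == pvEmptyRow)).reverse := by
  induction s with
  | nil => simp [pvFindCut]
  | cons a s ih =>
    simp only [List.reverse_cons, List.length_append, List.length_reverse,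
      List.length_cons, List.length_nil]
    show (s.reverse ++ [a]).take (pvFindCut (s.reverse ++ [a]) (s.length + 1)) = _
    have hget : (s.reverse ++ [a])[s.length]? = some a := by
      simp
    simp only [pvFindCut, hget, Option.some.injEq, List.dropWhile_cons]
    by_cases h : a = pvEmptyRow
    · subst h
      simp only [beq_self_eq_true, if_pos trivial]
      rw [pvFindCut_append s.reverse pvEmptyRow s.length (by simp)]
      rw [List.take_append_of_le_length (by simpa using pvFindCut_le s.reverse s.length)]
      simpa using ih
    · have h2 : ¬ (a == pvEmptyRow) = true := by simp [h]
      simp only [if_neg h, if_neg h2, List.reverse_cons]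
      rw [List.take_of_length_le (by simp)]

-- ===== VERDICT (by name: the statement is the Claim_ definition above) =====
theorem siisti_spec : Claim_equal_siisti := by
  intro torni _
  show siisti torni = siisti_alt torni
  have h1 := siistiLoop_reverse torni.reverse
  have h2 := siisti_alt_reverse torni.reverse
  simp only [List.reverse_reverse] at h1 h2
  unfold siisti siisti_alt
  rw [h1, h2]
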